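-- pv_equiv track=rewrite | github.com/iamneilroberts/windows-mcp-bridge | mcp_use/agents/prompt_viewer.py | format_prompt_list
-- ===== SOURCE A (Python) =====
-- from typing import List, Dict, Any, Optional
--
-- def format_prompt_list(prompts: List[Dict[str, Any]]) -> str:
--     """Format a list of prompts for display."""
--     if not prompts:
--         return "No prompts found."
--
--     # Group by category
--     by_category = {}
--     for prompt in prompts:
--         category = prompt.get('category', 'Uncategorized')
--         if category not in by_category:
--             by_category[category] = []
--         by_category[category].append(prompt)
--
--     output = "# Available Prompts\n\n"
--
--     for category, category_prompts in sorted(by_category.items()):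
--         output += f"## {category}\n\n"
--         for prompt in sorted(category_prompts, key=lambda p: p.get('name', '')):
--             name = prompt.get('name', 'Unnamed')
--             desc = prompt.get('description', 'No description')
--             output += f"- **{name}**: {desc}\n"
--         output += "\n"
--
--     return output
-- ===== SOURCE B (Python) =====
-- def format_prompt_list(prompts):
--     """Format a list of prompts for display."""
--     if not prompts:
--         return "No prompts found."
--
--     key = lambda p: (p.get('category', 'Uncategorized'), p.get('name', ''))
--     out = "# Available Prompts\n\n"
--     prev = None
--     for p in sorted(prompts, key=key):
--         category = p.get('category', 'Uncategorized')
--         if prev != category: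
--             if prev is not None:
--                 out += "\n"
--             out += f"## {category}\n\n"
--             prev = category
--         out += f"- **{p.get('name', 'Unnamed')}**: {p.get('description', 'No description')}\n"
--     return out + "\n"
-- ===== Notes on version B (the rewrite author's own statement) =====
-- stated objective: idiomatic
-- what changed: Replaces the dict grouping pass plus per-category sorts with one stable sort of the whole list by the combined (category, name) key followed by a single linear emit pass that starts a new section whenever the category changes.
import Mathlib
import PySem

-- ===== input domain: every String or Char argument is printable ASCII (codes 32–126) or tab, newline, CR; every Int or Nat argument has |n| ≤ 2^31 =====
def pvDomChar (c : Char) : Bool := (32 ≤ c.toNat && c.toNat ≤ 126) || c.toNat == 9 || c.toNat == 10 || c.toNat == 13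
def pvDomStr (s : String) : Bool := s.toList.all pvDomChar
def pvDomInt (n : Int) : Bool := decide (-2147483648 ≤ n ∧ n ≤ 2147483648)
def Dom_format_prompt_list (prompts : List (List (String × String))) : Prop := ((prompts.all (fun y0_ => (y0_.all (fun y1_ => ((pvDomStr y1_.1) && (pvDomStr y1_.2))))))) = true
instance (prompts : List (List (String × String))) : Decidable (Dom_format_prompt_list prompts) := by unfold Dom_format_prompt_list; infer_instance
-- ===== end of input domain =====

-- B replaces A's dict-grouping pass plus per-category sorts by one stable sort on the
-- combined (category, name) key and a single linear emit pass (objective: idiomatic).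

-- shared helper: Python's prompt.get(k, dflt) — first match in the association list
def pvGet (p : List (String × String)) (k dflt : String) : String :=
  match p.find? (fun kv => kv.1 == k) with
  | some kv => kv.2
  | none => dflt

-- ===== PORT A =====
-- 'if category not in by_category: by_category[category] = []' followed by
-- 'by_category[category].append(prompt)' is ported literally as the conditional insert
-- followed by modify (append with default []).
-- 'sorted(by_category.items())' compares (key, value) tuples, but dict keys are unique,
-- so Python only ever compares the first components: ported as sorting by the key.
def format_prompt_list (prompts : List (List (String × String))) : String :=
  if prompts = [] then "No prompts found."
  else
    let by_category : PySem.Dict String (List (List (String × String))) :=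
      prompts.foldl (fun d prompt =>
        let category := pvGet prompt "category" "Uncategorized"
        let d := if d.contains category then d else d.insert category []
        d.modify category [] (fun l => l ++ [prompt])) PySem.Dict.empty
    let output := "# Available Prompts\n\n"
    (PySem.List.sorted by_category.items (fun kv => kv.1) false).foldl
      (fun output kv =>
        let output := output ++ "## " ++ kv.1 ++ "\n\n"
        let output := (PySem.List.sorted kv.2 (fun p => pvGet p "name" "") false).foldl
          (fun output prompt =>
            output ++ "- **" ++ pvGet prompt "name" "Unnamed" ++ "**: " ++
              pvGet prompt "description" "No description" ++ "\n")
          output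
        output ++ "\n") output

-- ===== PORT B =====
-- the body of B's single emit pass over the sorted list
def pvBody (st : String × Option String) (p : List (String × String)) : String × Option String :=
  let category := pvGet p "category" "Uncategorized"
  let st1 := if st.2 = some category then st
    else (st.1 ++ (if st.2 = none then "" else "\n") ++ "## " ++ category ++ "\n\n", some category)
  (st1.1 ++ "- **" ++ pvGet p "name" "Unnamed" ++ "**: " ++
      pvGet p "description" "No description" ++ "\n", st1.2)

def format_prompt_list_alt (prompts : List (List (String × String))) : String :=
  if prompts = [] then "No prompts found."
  else
    let res := (PySem.List.sorted2 prompts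
        (fun p => pvGet p "category" "Uncategorized")
        (fun p => pvGet p "name" "")).foldl pvBody ("# Available Prompts\n\n", none)
    res.1 ++ "\n"

-- ===== PRECONDITION & SPEC =====
def Spec_format_prompt_list (prompts : List (List (String × String))) (out : String) : Prop := out = format_prompt_list_alt prompts
instance (prompts : List (List (String × String))) (out : String) : Decidable (Spec_format_prompt_list prompts out) := by unfold Spec_format_prompt_list; infer_instance

-- ===== CLAIM (what is proved, stated in full; the proofs are below) =====
def Claim_equal_format_prompt_list : Prop := ∀ (prompts : List (List (String × String))), Dom_format_prompt_list prompts → Spec_format_prompt_list prompts (format_prompt_list prompts)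

-- ===== LEMMAS AND PROOFS =====

-- abbreviations used only by the proofs
def pvK1 (p : List (String × String)) : String := pvGet p "category" "Uncategorized"
def pvK2 (p : List (String × String)) : String := pvGet p "name" ""
def pvLine (p : List (String × String)) : String :=
  "- **" ++ pvGet p "name" "Unnamed" ++ "**: " ++ pvGet p "description" "No description" ++ "\n"
def pvJoin (l : List String) : String := l.foldr (· ++ ·) ""
def pvLex {α : Type} (k1 k2 : α → String) (a b : α) : Bool :=
  decide (k1 a < k1 b) || (!decide (k1 b < k1 a) && decide (k2 a < k2 b))
def pvCats (prompts : List (List (String × String))) : List String :=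
  PySem.List.sorted (PySem.Set.ofList (prompts.map pvK1)) (fun c => c) false
def pvGrp (prompts : List (List (String × String))) (c : String) : List (List (String × String)) :=
  PySem.List.sorted (prompts.filter (fun y => pvK1 y == c)) pvK2 false
def pvBlockStr (prompts : List (List (String × String))) (c : String) : String :=
  "## " ++ c ++ "\n\n" ++ pvJoin ((pvGrp prompts c).map pvLine)

@[simp] lemma pvJoin_nil : pvJoin [] = "" := rfl
@[simp] lemma pvJoin_cons (s : String) (l : List String) : pvJoin (s :: l) = s ++ pvJoin l := rfl

lemma pv_insertBy_nil {α : Type} (b : α → α → Bool) (x : α) :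
    PySem.List.insertBy b x [] = [x] := by simp [PySem.List.insertBy]

lemma pv_insertBy_cons {α : Type} (b : α → α → Bool) (x y : α) (ys : List α) :
    PySem.List.insertBy b x (y :: ys) =
      if b x y then x :: y :: ys else y :: PySem.List.insertBy b x ys := by
  simp [PySem.List.insertBy]

lemma pv_insertBy_pass {α : Type} (b : α → α → Bool) (x : α) (L1 L2 : List α)
    (h : ∀ y ∈ L1, b x y = false) :
    PySem.List.insertBy b x (L1 ++ L2) = L1 ++ PySem.List.insertBy b x L2 := by
  induction L1 with
  | nil => simp
  | cons y ys ih =>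
    simp only [List.cons_append, pv_insertBy_cons, h y (by simp)]
    simp only [if_neg Bool.false_ne_true, List.cons.injEq, true_and]
    exact ih (fun z hz => h z (by simp [hz]))

lemma pv_insertBy_boundary {α : Type} (b nb : α → α → Bool) (x : α) (L1 L2 : List α)
    (h1 : ∀ y ∈ L1, b x y = nb x y) (h2 : ∀ y ∈ L2, b x y = true) :
    PySem.List.insertBy b x (L1 ++ L2) = PySem.List.insertBy nb x L1 ++ L2 := by
  induction L1 with
  | nil =>
    cases L2 with
    | nil => simp [pv_insertBy_nil]
    | cons z zs => simp [pv_insertBy_cons, h2 z (by simp), pv_insertBy_nil]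
  | cons y ys ih =>
    have hy := h1 y (by simp)
    simp only [List.cons_append, pv_insertBy_cons, hy]
    by_cases hb : nb x y
    · simp [hb]
    · simp only [Bool.not_eq_true] at hb
      simp only [hb, if_neg Bool.false_ne_true, List.cons_append, List.cons.injEq, true_and]
      exact ih (fun z hz => h1 z (by simp [hz]))

lemma pv_sorted_append_one {α κ : Type} [LT κ] [DecidableLT κ] (xs : List α) (x : α) (key : α → κ) :
    PySem.List.sorted (xs ++ [x]) key false =
      PySem.List.insertBy (fun a b => decide (key a < key b)) x (PySem.List.sorted xs key false) := by
  simp [PySem.List.sorted, List.foldl_append]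

lemma pv_sorted2_append_one {α : Type} (k1 k2 : α → String) (xs : List α) (x : α) :
    PySem.List.sorted2 (xs ++ [x]) k1 k2 false =
      PySem.List.insertBy (pvLex k1 k2) x (PySem.List.sorted2 xs k1 k2 false) := by
  show List.foldl _ [] (xs ++ [x]) = _
  rw [List.foldl_append]
  rfl

lemma pv_ofList_append_one {α : Type} [BEq α] (l : List α) (c : α) :
    PySem.Set.ofList (l ++ [c]) = PySem.Set.add (PySem.Set.ofList l) c := by
  simp [PySem.Set.ofList, List.foldl_append]

-- inserting an element whose category already has a group: it lands inside that group
lemma pv_groups_mem {α : Type} (k1 k2 : α → String) (x : α) (cats : List String)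
    (g : String → List α)
    (hs : cats.Pairwise (· < ·))
    (hg : ∀ c ∈ cats, ∀ y ∈ g c, k1 y = c)
    (hm : k1 x ∈ cats) :
    PySem.List.insertBy (pvLex k1 k2) x (cats.flatMap g) =
      cats.flatMap (fun c => if c = k1 x then
        PySem.List.insertBy (fun a b => decide (k2 a < k2 b)) x (g c) else g c) := by
  induction cats with
  | nil => cases hm
  | cons c0 rest ih =>
    rcases List.pairwise_cons.mp hs with ⟨hlt, hrest⟩
    rcases lt_trichotomy c0 (k1 x) with hc | hc | hc
    · -- pass over this group
      have hm' : k1 x ∈ rest := by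
        rcases List.mem_cons.mp hm with h | h
        · exact absurd h.symm (ne_of_lt hc)
        · exact h
      simp only [List.flatMap_cons]
      rw [pv_insertBy_pass]
      · rw [ih hrest (fun c hc' y hy => hg c (by simp [hc']) y hy) hm']
        have : ¬ (c0 = k1 x) := ne_of_lt hc
        simp [this]
      · intro y hy
        have hky : k1 y = c0 := hg c0 (by simp) y hy
        simp [pvLex, hky, not_lt_of_gt hc, hc]
    · -- this is the group
      subst hc
      simp only [List.flatMap_cons]
      rw [pv_insertBy_boundary (pvLex k1 k2) (fun a b => decide (k2 a < k2 b)) x (g (k1 x))]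
      · have hrw : ∀ c ∈ rest, (if c = k1 x then
            PySem.List.insertBy (fun a b => decide (k2 a < k2 b)) x (g c) else g c) = g c := by
          intro c hc'
          have : k1 x < c := hlt c hc'
          simp [ne_of_gt this]
        rw [List.flatMap_congr hrw]
        simp
      · intro y hy
        have hky : k1 y = k1 x := hg (k1 x) (by simp) y hy
        simp [pvLex, hky]
      · intro y hy
        rcases List.mem_flatMap.mp hy with ⟨c, hc', hyc⟩
        have hky : k1 y = c := hg c (by simp [hc']) y hyc
        have : k1 x < c := hlt c hc'
        simp [pvLex, hky, this]
    · -- k1 x < c0 contradicts membership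
      exfalso
      rcases List.mem_cons.mp hm with h | h
      · exact absurd h.symm (ne_of_gt hc)
      · exact absurd (hlt _ h) (not_lt_of_gt hc)

-- inserting an element with a fresh category: it forms a new singleton group in key position
lemma pv_groups_new {α : Type} (k1 k2 : α → String) (x : α) (cats : List String)
    (g : String → List α)
    (hs : cats.Pairwise (· < ·))
    (hg : ∀ c ∈ cats, ∀ y ∈ g c, k1 y = c)
    (hne : ∀ c ∈ cats, g c ≠ [])
    (hm : k1 x ∉ cats) :
    PySem.List.insertBy (pvLex k1 k2) x (cats.flatMap g) =
      (PySem.List.insertBy (fun a b => decide (a < b)) (k1 x) cats).flatMap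
        (fun c => if c = k1 x then [x] else g c) := by
  induction cats with
  | nil => simp [pv_insertBy_nil]
  | cons c0 rest ih =>
    rcases List.pairwise_cons.mp hs with ⟨hlt, hrest⟩
    have hne0 : c0 ≠ k1 x := fun h => hm (by simp [h])
    rcases lt_or_gt_of_ne hne0 with hc | hc
    · -- c0 < k1 x : pass over this group, keep c0 in front
      simp only [List.flatMap_cons, pv_insertBy_cons]
      rw [if_neg (by simp [not_lt_of_gt hc])]
      rw [pv_insertBy_pass]
      · rw [ih hrest (fun c hc' y hy => hg c (by simp [hc']) y hy)
            (fun c hc' => hne c (by simp [hc'])) (fun h => hm (by simp [h]))]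
        simp [hne0]
      · intro y hy
        have hky : k1 y = c0 := hg c0 (by simp) y hy
        simp [pvLex, hky, not_lt_of_gt hc, hc]
    · -- k1 x < c0 : x goes right here, in front of this group
      obtain ⟨z, zs, hz⟩ := List.exists_cons_of_ne_nil (hne c0 (by simp))
      have hkz : k1 z = c0 := hg c0 (by simp) z (by simp [hz])
      simp only [List.flatMap_cons, pv_insertBy_cons, hz, List.cons_append]
      rw [if_pos (by simp [pvLex, hkz, hc]), if_pos (by simp [hc])]
      have hrw : ∀ c ∈ c0 :: rest, (if c = k1 x then ([x] : List α) else g c) = g c := by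
        intro c hc'
        have : c ≠ k1 x := by
          rintro rfl
          exact hm hc'
        simp [this]
      simp [List.flatMap_congr hrw, hz]

-- the stable sort on the combined (category, name) key, decomposed: sorted distinct
-- categories, each carrying its name-sorted group
lemma pv_sorted2_eq_flatMap {α : Type} (k1 k2 : α → String) (xs : List α) :
    PySem.List.sorted2 xs k1 k2 false =
      (PySem.List.sorted (PySem.Set.ofList (xs.map k1)) (fun c => c) false).flatMap
        (fun c => PySem.List.sorted (xs.filter (fun y => k1 y == c)) k2 false) := by
  induction xs using List.reverseRecOn with
  | nil => rfl
  | append_singleton xs x ih =>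
    have hcats_pw := PySem.List.sorted_ofList_pairwise_lt (xs.map k1)
    have hg : ∀ c ∈ PySem.List.sorted (PySem.Set.ofList (xs.map k1)) (fun c => c) false,
        ∀ y ∈ PySem.List.sorted (xs.filter (fun y => k1 y == c)) k2 false, k1 y = c := by
      intro c _ y hy
      have := (PySem.List.mem_sorted _ _ _ _).mp hy
      have := List.of_mem_filter this
      exact eq_of_beq this
    rw [pv_sorted2_append_one, ih, List.map_append, List.map_singleton, pv_ofList_append_one]
    by_cases hmem : k1 x ∈ xs.map k1
    · -- existing category
      have hSadd : PySem.Set.add (PySem.Set.ofList (xs.map k1)) (k1 x)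
          = PySem.Set.ofList (xs.map k1) := by
        have : (PySem.Set.ofList (xs.map k1)).contains (k1 x) = true :=
          List.contains_iff_mem.mpr ((PySem.Set.mem_ofList _ _).mpr hmem)
        simp only [PySem.Set.add]
        rw [if_pos this]
      rw [hSadd]
      have hm' : k1 x ∈ PySem.List.sorted (PySem.Set.ofList (xs.map k1)) (fun c => c) false :=
        (PySem.List.mem_sorted _ _ _ _).mpr ((PySem.Set.mem_ofList _ _).mpr hmem)
      rw [pv_groups_mem k1 k2 x _ _ hcats_pw hg hm']
      apply List.flatMap_congr
      intro c _
      by_cases hcx : c = k1 x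
      · subst hcx
        rw [if_pos rfl, List.filter_append, List.filter_singleton]
        simp only [beq_self_eq_true, cond_true]
        rw [pv_sorted_append_one]
      · rw [if_neg hcx, List.filter_append, List.filter_singleton]
        have : (k1 x == c) = false := beq_eq_false_iff_ne.mpr (fun h => hcx h.symm)
        simp [this]
    · -- fresh category
      have hSadd : PySem.Set.add (PySem.Set.ofList (xs.map k1)) (k1 x)
          = PySem.Set.ofList (xs.map k1) ++ [k1 x] := by
        have : (PySem.Set.ofList (xs.map k1)).contains (k1 x) = false := by
          rw [Bool.eq_false_iff]
          intro h
          exact hmem ((PySem.Set.mem_ofList _ _).mp (List.contains_iff_mem.mp h))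
        simp only [PySem.Set.add]
        rw [if_neg (by rw [this]; simp)]
      rw [hSadd, pv_sorted_append_one]
      have hm' : k1 x ∉ PySem.List.sorted (PySem.Set.ofList (xs.map k1)) (fun c => c) false := by
        intro h
        exact hmem ((PySem.Set.mem_ofList _ _).mp ((PySem.List.mem_sorted _ _ _ _).mp h))
      have hne : ∀ c ∈ PySem.List.sorted (PySem.Set.ofList (xs.map k1)) (fun c => c) false,
          PySem.List.sorted (xs.filter (fun y => k1 y == c)) k2 false ≠ [] := by
        intro c hc h
        rw [PySem.List.sorted_eq_nil_iff] at h
        have hcmem : c ∈ xs.map k1 :=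
          (PySem.Set.mem_ofList _ _).mp ((PySem.List.mem_sorted _ _ _ _).mp hc)
        rcases List.mem_map.mp hcmem with ⟨y, hy, hky⟩
        have := List.filter_eq_nil_iff.mp h y hy
        simp [hky] at this
      rw [pv_groups_new k1 k2 x _ _ hcats_pw hg hne hm']
      apply List.flatMap_congr
      intro c hc
      by_cases hcx : c = k1 x
      · subst hcx
        rw [if_pos rfl, List.filter_append, List.filter_singleton]
        have hnilf : xs.filter (fun y => k1 y == k1 x) = [] := by
          apply List.filter_eq_nil_iff.mpr
          intro y hy h
          exact hmem (List.mem_map.mpr ⟨y, hy, (eq_of_beq h)⟩)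
        simp [hnilf, pv_insertBy_nil, PySem.List.sorted]
      · rw [if_neg hcx, List.filter_append, List.filter_singleton]
        have : (k1 x == c) = false := beq_eq_false_iff_ne.mpr (fun h => hcx h.symm)
        simp [this]

-- folding a string-building body is appending the join of the per-element pieces
lemma pv_foldl_join {β : Type} (body : String → β → String) (F : β → String)
    (h : ∀ o c, body o c = o ++ F c) :
    ∀ (l : List β) (s : String), l.foldl body s = s ++ pvJoin (l.map F) := by
  intro l
  induction l with
  | nil => intro s; simp
  | cons y ys ih =>
    intro s
    simp only [List.foldl_cons, List.map_cons, pvJoin_cons, h s y, ih, String.append_assoc]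

-- ===== A-side characterisation =====

lemma pv_dict_step_eq (d : PySem.Dict String (List (List (String × String)))) (c : String)
    (p : List (String × String)) :
    (if d.contains c then d else d.insert c []).modify c [] (fun l => l ++ [p])
      = d.modify c [] (fun l => l ++ [p]) := by
  by_cases h : d.contains c
  · simp [h]
  · simp only [Bool.not_eq_true] at h
    simp only [h, Bool.false_eq_true, if_neg, not_false_iff]
    simp only [PySem.Dict.modify, PySem.Dict.getD_insert_self, PySem.Dict.insert_insert_self,
      PySem.Dict.getD_of_not_contains _ _ h]

lemma pv_A_eq (prompts : List (List (String × String))) (h : prompts ≠ []) :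
    format_prompt_list prompts =
      "# Available Prompts\n\n" ++
        pvJoin ((pvCats prompts).map (fun c => pvBlockStr prompts c ++ "\n")) := by
  rw [format_prompt_list, if_neg h]
  have hstep : (fun (d : PySem.Dict String (List (List (String × String)))) prompt =>
      let category := pvGet prompt "category" "Uncategorized"
      let d' := if d.contains category then d else d.insert category []
      d'.modify category [] (fun l => l ++ [prompt]))
      = (fun d prompt => d.modify (pvK1 prompt) [] (fun l => l ++ [prompt])) := by
    funext d prompt
    exact pv_dict_step_eq d _ prompt
  rw [hstep]
  set D := prompts.foldl (fun d prompt => d.modify (pvK1 prompt) [] (fun l => l ++ [prompt]))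
    PySem.Dict.empty with hD
  have hkeys : D.keys = PySem.Set.ofList (prompts.map pvK1) := by
    rw [hD, PySem.Dict.keys_foldl_modify_key prompts pvK1 [] (fun _ p l => l ++ [p])]
    simp [PySem.Set.update_nil_left]
  have hnodup : D.keys.Nodup := by
    rw [hD]
    exact PySem.Dict.nodup_keys_foldl_modify_key prompts pvK1 [] (fun _ p l => l ++ [p])
      PySem.Dict.empty (by simp)
  have hgetD : ∀ c, D.getD c [] = prompts.filter (fun y => pvK1 y == c) := by
    intro c
    have hfold : D = List.foldl
        (fun (d : PySem.Dict String (List (List (String × String)))) (q : String × List (String × String)) =>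
          d.modify q.1 [] (fun l => l ++ [q.2]))
        PySem.Dict.empty (prompts.map (fun p => (pvK1 p, p))) := by
      rw [hD, List.foldl_map]
    rw [hfold, PySem.Dict.getD_foldl_modify_append]
    simp [List.filter_map, Function.comp_def, List.map_map]
  have hitems : PySem.List.sorted D.items (fun kv => kv.1) false
      = (pvCats prompts).map (fun c => (c, prompts.filter (fun y => pvK1 y == c))) := by
    apply PySem.List.sorted_eq_of_perm_of_pairwise_lt
    · have hperm : (PySem.List.sorted (PySem.Set.ofList (prompts.map pvK1)) (fun c => c)
          false).Perm (PySem.Set.ofList (prompts.map pvK1)) := PySem.List.sorted_perm _ _ _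
      have := hperm.map (fun c => (c, prompts.filter (fun y => pvK1 y == c)))
      refine this.trans ?_
      rw [PySem.Dict.items_eq_map_keys D hnodup [], hkeys]
      apply List.Perm.of_eq
      apply List.map_congr_left
      intro c _
      simp [hgetD c]
    · have := PySem.List.sorted_ofList_pairwise_lt (prompts.map pvK1)
      rw [← pvCats] at this
      exact List.pairwise_map.mpr this
  change List.foldl _ "# Available Prompts\n\n" (PySem.List.sorted D.items fun kv => kv.1) = _
  rw [hitems, List.foldl_map]
  apply pv_foldl_join
  intro o c
  have hinner : ∀ (s : String),
      (PySem.List.sorted (prompts.filter (fun y => pvK1 y == c)) (fun p => pvGet p "name" "")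
        false).foldl (fun output prompt => output ++ "- **" ++ pvGet prompt "name" "Unnamed"
          ++ "**: " ++ pvGet prompt "description" "No description" ++ "\n") s
      = s ++ pvJoin ((pvGrp prompts c).map pvLine) := by
    intro s
    rw [pv_foldl_join _ pvLine (by intro o p; simp [pvLine, String.append_assoc])]
    rfl
  show List.foldl
      (fun output prompt => output ++ "- **" ++ pvGet prompt "name" "Unnamed" ++ "**: " ++
        pvGet prompt "description" "No description" ++ "\n")
      (o ++ "## " ++ c ++ "\n\n")
      (PySem.List.sorted (List.filter (fun y => pvK1 y == c) prompts) fun p => pvGet p "name" "")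
      ++ "\n" = o ++ (pvBlockStr prompts c ++ "\n")
  rw [hinner]
  simp [pvBlockStr, String.append_assoc]

-- ===== B-side characterisation =====

lemma pv_body_same (c : String) :
    ∀ (ys : List (List (String × String))), (∀ y ∈ ys, pvK1 y = c) →
    ∀ (s : String), ys.foldl pvBody (s, some c) = (s ++ pvJoin (ys.map pvLine), some c) := by
  intro ys
  induction ys with
  | nil => intro _ s; simp
  | cons y ys ih =>
    intro hy s
    have hc : pvGet y "category" "Uncategorized" = c := hy y (by simp)
    have hstep : pvBody (s, some c) y = (s ++ pvLine y, some c) := by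
      simp [pvBody, hc, pvLine, String.append_assoc]
    rw [List.foldl_cons, hstep, ih (fun z hz => hy z (by simp [hz]))]
    simp [String.append_assoc]

lemma pv_body_sections :
    ∀ (cats : List String) (g : String → List (List (String × String))),
    cats.Pairwise (· < ·) → (∀ c ∈ cats, g c ≠ []) → (∀ c ∈ cats, ∀ y ∈ g c, pvK1 y = c) →
    ∀ (q : String), q ∉ cats → ∀ (s : String),
    (cats.flatMap g).foldl pvBody (s, some q) =
      (s ++ pvJoin (cats.map (fun c => "\n" ++ ("## " ++ c ++ "\n\n" ++ pvJoin ((g c).map pvLine)))),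
        some (cats.getLastD q)) := by
  intro cats
  induction cats with
  | nil => intro g _ _ _ q _ s; simp
  | cons c0 rest ih =>
    intro g hs hne hg q hq s
    rcases List.pairwise_cons.mp hs with ⟨hlt, hrest⟩
    obtain ⟨y, ys, hz⟩ := List.exists_cons_of_ne_nil (hne c0 (by simp))
    have hky : pvGet y "category" "Uncategorized" = c0 := hg c0 (by simp) y (by simp [hz])
    have hqne : q ≠ c0 := fun hh => hq (by simp [hh])
    simp only [List.flatMap_cons, List.foldl_append, hz, List.foldl_cons]
    rw [show pvBody (s, some q) y
        = (s ++ "\n" ++ "## " ++ c0 ++ "\n\n" ++ pvLine y, some c0) by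
      refine Prod.ext ?_ ?_
      · show (if (some q : Option String) = some (pvGet y "category" "Uncategorized") then ((s, some q) : String × Option String)
            else (s ++ (if (some q : Option String) = none then "" else "\n") ++ "## " ++ pvGet y "category" "Uncategorized" ++ "\n\n",
              some (pvGet y "category" "Uncategorized"))).1 ++ "- **" ++ pvGet y "name" "Unnamed" ++ "**: " ++
              pvGet y "description" "No description" ++ "\n" = _
        rw [hky, if_neg (by simp [hqne])]
        rw [← String.toList_inj]
        simp [pvLine]
      · show (if (some q : Option String) = some (pvGet y "category" "Uncategorized") then ((s, some q) : String × Option String)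
            else (s ++ (if (some q : Option String) = none then "" else "\n") ++ "## " ++ pvGet y "category" "Uncategorized" ++ "\n\n",
              some (pvGet y "category" "Uncategorized"))).2 = _
        rw [hky, if_neg (by simp [hqne])]]
    rw [pv_body_same c0 ys (fun z hz' => hg c0 (by simp) z (by simp [hz, hz'])) _]
    rw [ih g hrest (fun c hc => hne c (by simp [hc])) (fun c hc z hz' => hg c (by simp [hc]) z hz')
      c0 (fun hmem => absurd (hlt c0 hmem) (lt_irrefl c0)) _]
    refine Prod.ext ?_ ?_
    · rw [← String.toList_inj]
      simp [hz]
    · exact congrArg some (List.getLastD_cons).symm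

lemma pv_cats_grp_sound (prompts : List (List (String × String))) :
    (∀ c ∈ pvCats prompts, pvGrp prompts c ≠ []) ∧
    (∀ c ∈ pvCats prompts, ∀ y ∈ pvGrp prompts c, pvK1 y = c) := by
  constructor
  · intro c hc h
    rw [pvGrp, PySem.List.sorted_eq_nil_iff] at h
    have hcmem : c ∈ prompts.map pvK1 :=
      (PySem.Set.mem_ofList _ _).mp ((PySem.List.mem_sorted _ _ _ _).mp hc)
    rcases List.mem_map.mp hcmem with ⟨y, hy, hky⟩
    have := List.filter_eq_nil_iff.mp h y hy
    simp [hky] at this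
  · intro c _ y hy
    have := (PySem.List.mem_sorted _ _ _ _).mp hy
    exact eq_of_beq (List.mem_filter.mp this).2

lemma pv_B_eq (prompts : List (List (String × String))) (h : prompts ≠ []) :
    ∀ (c0 : String) (rest : List String), pvCats prompts = c0 :: rest →
    format_prompt_list_alt prompts =
      "# Available Prompts\n\n" ++
        (pvBlockStr prompts c0 ++
          (pvJoin (rest.map (fun c => "\n" ++ pvBlockStr prompts c)) ++ "\n")) := by
  intro c0 rest hcats
  rw [format_prompt_list_alt, if_neg h]
  have hs2 : PySem.List.sorted2 prompts
      (fun p => pvGet p "category" "Uncategorized") (fun p => pvGet p "name" "")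
      = (pvCats prompts).flatMap (fun c => pvGrp prompts c) := by
    have := pv_sorted2_eq_flatMap (α := List (String × String)) pvK1 pvK2 prompts
    exact this
  obtain ⟨hne, hg⟩ := pv_cats_grp_sound prompts
  have hpw : (pvCats prompts).Pairwise (· < ·) := PySem.List.sorted_ofList_pairwise_lt _
  rw [hcats] at hs2 hne hg hpw
  rcases List.pairwise_cons.mp hpw with ⟨hlt, hrest⟩
  obtain ⟨y, ys, hz⟩ := List.exists_cons_of_ne_nil (hne c0 (by simp))
  have hky : pvGet y "category" "Uncategorized" = c0 := hg c0 (by simp) y (by simp [hz])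
  simp only [hs2, List.flatMap_cons, List.foldl_append, hz, List.foldl_cons]
  rw [show pvBody ("# Available Prompts\n\n", none) y
      = ("# Available Prompts\n\n" ++ "## " ++ c0 ++ "\n\n" ++ pvLine y, some c0) by
    simp [pvBody, hky, pvLine, String.append_assoc]
    rw [← String.toList_inj]
    simp]
  rw [pv_body_same c0 ys (fun z hz' => hg c0 (by simp) z (by simp [hz, hz'])) _]
  rw [pv_body_sections rest (fun c => pvGrp prompts c) hrest
    (fun c hc => hne c (by simp [hc])) (fun c hc z hz' => hg c (by simp [hc]) z hz')
    c0 (fun hmem => absurd (hlt c0 hmem) (lt_irrefl c0)) _]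
  simp [pvBlockStr, hz]
  rw [← String.toList_inj]
  simp

-- joining blocks each followed by "\n" = first block, then "\n"-prefixed blocks, then "\n"
lemma pv_join_shift (F : String → String) :
    ∀ (rest : List String) (c0 : String),
    pvJoin ((c0 :: rest).map (fun c => F c ++ "\n")) =
      F c0 ++ (pvJoin (rest.map (fun c => "\n" ++ F c)) ++ "\n") := by
  intro rest
  induction rest with
  | nil => intro c0; rw [← String.toList_inj]; simp
  | cons c1 rest ih =>
    intro c0
    simp only [List.map_cons, pvJoin_cons] at *
    rw [ih c1]
    rw [← String.toList_inj]
    simp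

-- ===== VERDICT (by name: the statement is the Claim_ definition above) =====
theorem format_prompt_list_spec : Claim_equal_format_prompt_list := by
  intro prompts _
  unfold Spec_format_prompt_list
  by_cases h : prompts = []
  · subst h; rfl
  · have hcne : pvCats prompts ≠ [] := by
      obtain ⟨p, ps, hp⟩ := List.exists_cons_of_ne_nil h
      intro hc
      rw [pvCats, PySem.List.sorted_eq_nil_iff] at hc
      have : pvK1 p ∈ PySem.Set.ofList (prompts.map pvK1) :=
        (PySem.Set.mem_ofList _ _).mpr (List.mem_map.mpr ⟨p, by simp [hp], rfl⟩)
      rw [hc] at this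
      cases this
    obtain ⟨c0, rest, hcats⟩ := List.exists_cons_of_ne_nil hcne
    rw [pv_A_eq prompts h, pv_B_eq prompts h c0 rest hcats, hcats]
    rw [pv_join_shift (pvBlockStr prompts) rest c0]
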